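-- pv_equiv track=rewrite | github.com/rajobasu/H4G-Githubscraper | main.py | process_all_keywords
-- ===== SOURCE A (Python) =====
-- def get_associated_concept_from_keyword(keyword):
--     parts = keyword.split(".")
--     if len(parts) == 1:
--         return parts[0]
--
--     main_part = parts[0] + "." + parts[1]
--     return main_part
--
-- def process_all_keywords(keywords):
--     concept_frequency_dict = {}
--     for keyword, freq in keywords.items():
--         concept = get_associated_concept_from_keyword(keyword)
--         if concept in concept_frequency_dict:
--             concept_frequency_dict[concept] += freq
--         else:
--             concept_frequency_dict[concept] = freq
--     return concept_frequency_dict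
-- ===== SOURCE B (Python) =====
-- def get_associated_concept_from_keyword(keyword):
--     parts = keyword.split(".")
--     if len(parts) == 1:
--         return parts[0]
--
--     main_part = parts[0] + "." + parts[1]
--     return main_part
--
-- def process_all_keywords(keywords):
--     concepts = [get_associated_concept_from_keyword(k) for k in keywords]
--     order = dict.fromkeys(concepts)  # distinct concepts, first-occurrence order
--     return {c: sum(f for k, f in keywords.items()
--                    if get_associated_concept_from_keyword(k) == c)
--             for c in order}
-- ===== Notes on version B (the rewrite author's own statement) =====
-- stated objective: alternative
-- what changed: Replaces the single-pass hash accumulation with a map/ordered-dedup of concepts followed by one summing comprehension per distinct concept.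
import Mathlib
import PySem

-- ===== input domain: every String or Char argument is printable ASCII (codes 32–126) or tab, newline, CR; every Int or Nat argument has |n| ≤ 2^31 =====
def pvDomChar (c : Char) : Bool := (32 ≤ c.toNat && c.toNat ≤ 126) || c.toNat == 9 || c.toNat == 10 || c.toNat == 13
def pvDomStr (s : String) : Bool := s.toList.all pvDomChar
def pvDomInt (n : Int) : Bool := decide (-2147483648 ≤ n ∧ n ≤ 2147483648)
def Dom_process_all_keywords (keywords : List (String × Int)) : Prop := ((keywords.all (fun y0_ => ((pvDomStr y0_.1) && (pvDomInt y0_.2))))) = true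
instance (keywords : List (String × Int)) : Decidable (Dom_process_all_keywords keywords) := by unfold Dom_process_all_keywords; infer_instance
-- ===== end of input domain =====

-- B replaces A's single-pass dict accumulation by map → ordered-dedup → per-concept sums (alternative decomposition, same results).


-- ===== PORT A =====
-- shared helper (identical in Source A and Source B): keyword.split(".") and keep the first one or two parts
-- (split? with the literal separator "." is always `some`, so the `.getD []` is never taken)
def get_associated_concept_from_keyword (keyword : String) : String :=
  let parts := (PySem.Str.split? keyword ".").getD []
  if parts.length = 1 then (PySem.List.pyGet? parts 0).getD ""
  else ((PySem.List.pyGet? parts 0).getD "") ++ "." ++ ((PySem.List.pyGet? parts 1).getD "")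

def process_all_keywords (keywords : List (String × Int)) : List (String × Int) :=
  (keywords.foldl
    (fun d p =>
      let concept := get_associated_concept_from_keyword p.1
      if d.contains concept then d.modify concept 0 (· + p.2)
      else d.insert concept p.2)
    (PySem.Dict.empty : PySem.Dict String Int)).items

-- ===== PORT B =====
def process_all_keywords_alt (keywords : List (String × Int)) : List (String × Int) :=
  let concepts := keywords.map (fun p => get_associated_concept_from_keyword p.1)
  let order := PySem.List.dedup concepts
  order.map (fun c =>
    (c, ((keywords.filter (fun p => get_associated_concept_from_keyword p.1 == c)).map (·.2)).sum))

-- ===== PRECONDITION & SPEC =====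
def Spec_process_all_keywords (keywords : List (String × Int)) (out : List (String × Int)) : Prop := out = process_all_keywords_alt keywords
instance (keywords : List (String × Int)) (out : List (String × Int)) : Decidable (Spec_process_all_keywords keywords out) := by unfold Spec_process_all_keywords; infer_instance

-- ===== CLAIM (what is proved, stated in full; the proofs are below) =====
def Claim_equal_process_all_keywords : Prop := ∀ (keywords : List (String × Int)), Dom_process_all_keywords keywords → Spec_process_all_keywords keywords (process_all_keywords keywords)

-- ===== LEMMAS AND PROOFS =====

-- A's two branches are both a `modify`: when the key is absent, modify with default 0 inserts 0 + v = v.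
lemma stepA_eq_modify (d : PySem.Dict String Int) (p : String × Int) :
    (let concept := get_associated_concept_from_keyword p.1
     if d.contains concept then d.modify concept 0 (· + p.2)
     else d.insert concept p.2)
    = d.modify (get_associated_concept_from_keyword p.1) 0 (· + p.2) := by
  by_cases h : d.contains (get_associated_concept_from_keyword p.1) = true
  · simp [h]
  · simp only [Bool.not_eq_true] at h
    simp [h, PySem.Dict.modify, PySem.Dict.getD_of_not_contains _ _ h]

-- value of any key after A's loop: the initial value plus the sum of the matching frequencies
lemma getD_fold_modify (l : List (String × Int)) (d : PySem.Dict String Int) (c : String) :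
    (l.foldl (fun d p => d.modify (get_associated_concept_from_keyword p.1) 0 (· + p.2)) d).getD c 0
    = d.getD c 0 + ((l.filter (fun p => get_associated_concept_from_keyword p.1 == c)).map (·.2)).sum := by
  induction l generalizing d with
  | nil => simp
  | cons p t ih =>
    simp only [List.foldl_cons, ih, List.filter_cons]
    rw [PySem.Dict.getD_modify]
    by_cases h : get_associated_concept_from_keyword p.1 = c
    · simp [h]; ring
    · simp [h, Ne.symm h]

-- ===== VERDICT (by name: the statement is the Claim_ definition above) =====
theorem process_all_keywords_spec : Claim_equal_process_all_keywords := by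
  intro kws _
  unfold Spec_process_all_keywords process_all_keywords process_all_keywords_alt
  dsimp only
  have hstep :
      (fun (d : PySem.Dict String Int) (p : String × Int) =>
        let concept := get_associated_concept_from_keyword p.1
        if d.contains concept then d.modify concept 0 (· + p.2)
        else d.insert concept p.2)
      = fun d p => d.modify (get_associated_concept_from_keyword p.1) 0 (· + p.2) := by
    funext d p; exact stepA_eq_modify d p
  rw [hstep]
  have hkeys :
      (kws.foldl (fun d p => d.modify (get_associated_concept_from_keyword p.1) 0 (· + p.2))
        (PySem.Dict.empty : PySem.Dict String Int)).keys
      = PySem.Set.ofList (kws.map (fun p => get_associated_concept_from_keyword p.1)) := by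
    rw [PySem.Dict.keys_foldl_modify_key kws (fun p => get_associated_concept_from_keyword p.1) 0
        (fun _ p => (· + p.2)) PySem.Dict.empty]
    simp [PySem.Set.update_nil_left]
  have hnodup :
      (kws.foldl (fun d p => d.modify (get_associated_concept_from_keyword p.1) 0 (· + p.2))
        (PySem.Dict.empty : PySem.Dict String Int)).keys.Nodup := by
    apply PySem.Dict.nodup_keys_foldl_modify_key kws (fun p => get_associated_concept_from_keyword p.1) 0
        (fun _ p => (· + p.2)) PySem.Dict.empty
    simp
  rw [PySem.Dict.items_eq_map_keys _ hnodup 0, hkeys, PySem.List.dedup_eq_ofList]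
  apply List.map_congr_left
  intro c _
  rw [getD_fold_modify]
  simp
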